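-- pv_equiv track=rewrite | github.com/xiaolong25/exp1 | solution/找轮廓点.py | Max_point
-- ===== SOURCE A (Python) =====
-- def Max_point(list,list1):
--     list1 = []
--     max_w = 0
--     max_h = 0
--     min_w = 1000
--     min_h = 1000
--     for i in range(len(list)):
--         if i%2 == 0:
--             if list[i] >max_w:
--                 max_w = list[i]
--             if list[i]< min_w:
--                 min_w = list[i]
--         else:
--             if list[i] >max_h:
--                 max_h = list[i]
--             if list[i]< min_h:
--                 min_h = list[i]
--     list1.append(max_w)
--     list1.append(min_w)
--     list1.append(max_h)
--     list1.append(min_h)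
--     return list1
-- ===== SOURCE B (Python) =====
-- def Max_point(list, list1):
--     even = list[0::2]
--     odd = list[1::2]
--     return [max([0] + even), min([1000] + even),
--             max([0] + odd), min([1000] + odd)]
-- ===== Notes on version B (the rewrite author's own statement) =====
-- stated objective: simpler
-- what changed: Replaces the parity-branched loop maintaining four running extrema with slicing into even/odd-indexed sublists and four library max/min reductions seeded with A's initial values 0 and 1000.
import Mathlib
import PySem

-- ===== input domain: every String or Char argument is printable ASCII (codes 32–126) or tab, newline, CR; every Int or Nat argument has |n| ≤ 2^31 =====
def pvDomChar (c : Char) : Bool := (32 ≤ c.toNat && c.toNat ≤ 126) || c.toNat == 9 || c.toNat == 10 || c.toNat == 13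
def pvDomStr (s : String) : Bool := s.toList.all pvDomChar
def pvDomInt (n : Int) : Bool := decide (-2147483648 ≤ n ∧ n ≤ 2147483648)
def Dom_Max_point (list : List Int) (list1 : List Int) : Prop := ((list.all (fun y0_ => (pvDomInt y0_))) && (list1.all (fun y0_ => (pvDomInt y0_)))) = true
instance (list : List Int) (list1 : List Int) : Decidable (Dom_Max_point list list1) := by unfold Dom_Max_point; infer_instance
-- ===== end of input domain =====

-- B replaces A's parity-branched running-extrema loop with even/odd slicing plus seeded
-- library max/min reductions (objective: simpler). Both versions ignore the list1 argument
-- (A rebinds it to [] before use); the equivalence is about the return value only.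

-- ===== PORT A =====
-- A's loop body, factored out of the fold (exact transliteration of the if/else branches;
-- list[i] is always in range inside the loop, so pyGetD's default 0 is never read).
def aStep (list : List Int) (st : Int × Int × Int × Int) (i : Int) : Int × Int × Int × Int :=
  let (max_w, max_h, min_w, min_h) := st
  if PySem.Int.mod i 2 == 0 then
    let v := PySem.List.pyGetD list i 0
    let max_w := if v > max_w then v else max_w
    let min_w := if v < min_w then v else min_w
    (max_w, max_h, min_w, min_h)
  else
    let v := PySem.List.pyGetD list i 0
    let max_h := if v > max_h then v else max_h
    let min_h := if v < min_h then v else min_h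
    (max_w, max_h, min_w, min_h)

def Max_point (list : List Int) (_list1 : List Int) : List Int :=
  let list1 : List Int := []  -- A immediately rebinds its second parameter to []
  let s := (PySem.List.pyRange 0 (list.length : Int) 1).foldl (aStep list) (0, 0, 1000, 1000)
  list1 ++ [s.1, s.2.2.1, s.2.1, s.2.2.2]

-- ===== PORT B =====
def Max_point_alt (list : List Int) (_list1 : List Int) : List Int :=
  let even := (PySem.List.slice? list (some 0) none 2).getD []
  let odd := (PySem.List.slice? list (some 1) none 2).getD []
  [ (PySem.List.max? (([0] : List Int) ++ even) (fun y => y)).getD 0,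
    (PySem.List.min? (([1000] : List Int) ++ even) (fun y => y)).getD 0,
    (PySem.List.max? (([0] : List Int) ++ odd) (fun y => y)).getD 0,
    (PySem.List.min? (([1000] : List Int) ++ odd) (fun y => y)).getD 0 ]

-- ===== PRECONDITION & SPEC =====
def Spec_Max_point (list : List Int) (list1 : List Int) (out : List Int) : Prop := out = Max_point_alt list list1
instance (list : List Int) (list1 : List Int) (out : List Int) : Decidable (Spec_Max_point list list1 out) := by unfold Spec_Max_point; infer_instance

-- ===== CLAIM (what is proved, stated in full; the proofs are below) =====
def Claim_equal_Max_point : Prop := ∀ (list : List Int) (list1 : List Int), Dom_Max_point list list1 → Spec_Max_point list list1 (Max_point list list1)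

-- ===== LEMMAS AND PROOFS =====

-- even-indexed elements (list[0::2]) and odd-indexed elements (list[1::2])
def evens : List Int → List Int
  | [] => []
  | [x] => [x]
  | x :: _ :: t => x :: evens t

def odds : List Int → List Int
  | [] => []
  | [_] => []
  | _ :: y :: t => y :: odds t

lemma fm_evens (xs : List Int) :
    (List.range ((xs.length + 1) / 2)).filterMap (fun k => xs[2 * k]?) = evens xs := by
  induction xs using evens.induct with
  | case1 => simp [evens]
  | case2 x => simp [evens]
  | case3 x y t ih =>
    have hlen : ((x :: y :: t).length + 1) / 2 = (t.length + 1) / 2 + 1 := by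
      simp only [List.length_cons]; omega
    rw [hlen, List.range_succ_eq_map, List.filterMap_cons, List.filterMap_map]
    have h2 : (fun k => (x :: y :: t)[2 * (Nat.succ k)]?) = fun k => t[2 * k]? := by
      funext k
      have h2 : 2 * (Nat.succ k) = (2 * k + 1) + 1 := by omega
      rw [h2, List.getElem?_cons_succ, List.getElem?_cons_succ]
    simp only [Function.comp_def, h2]
    simp [evens, ih]

lemma fm_odds (xs : List Int) :
    (List.range (xs.length / 2)).filterMap (fun k => xs[2 * k + 1]?) = odds xs := by
  induction xs using odds.induct with
  | case1 => simp [odds]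
  | case2 x => simp [odds]
  | case3 x y t ih =>
    have hlen : (x :: y :: t).length / 2 = t.length / 2 + 1 := by
      simp only [List.length_cons]; omega
    rw [hlen, List.range_succ_eq_map, List.filterMap_cons, List.filterMap_map]
    have h2 : (fun k => (x :: y :: t)[2 * (Nat.succ k) + 1]?) = fun k => t[2 * k + 1]? := by
      funext k
      have h2 : 2 * (Nat.succ k) + 1 = (2 * k + 1 + 1) + 1 := by omega
      rw [h2, List.getElem?_cons_succ, List.getElem?_cons_succ]
    simp only [Function.comp_def, h2]
    simp [odds, ih]

lemma slice2_evens (xs : List Int) :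
    PySem.List.slice? xs (some 0) none 2 = some (evens xs) := by
  rw [PySem.List.slice?]
  simp only [PySem.List.sliceIndices]
  norm_num
  have hcount : (if 0 < xs.length then (((xs.length : Int) + 2 - 1) / 2).toNat else 0) = (xs.length + 1) / 2 := by
    split_ifs with h <;> omega
  have hfun : (fun k : Nat => xs[(2 * (k : Int)).toNat]?) = fun k : Nat => xs[2 * k]? := by
    funext k
    have h : (2 * (k : Int)).toNat = 2 * k := by omega
    rw [h]
  rw [hcount, hfun]
  exact fm_evens xs

lemma slice2_odds (xs : List Int) :
    PySem.List.slice? xs (some 1) none 2 = some (odds xs) := by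
  rw [PySem.List.slice?]
  simp only [PySem.List.sliceIndices]
  norm_num
  rcases xs with _ | ⟨a, t⟩
  · simp [odds]
  · have hlen : (0:Int) < ((a :: t).length : Int) := by simp
    have hmin : min (1:Int) ((a :: t).length : Int) = 1 := by omega
    rw [hmin]
    have hcount : (if 1 < (a :: t).length then ((((a :: t).length : Int) - 1 + 2 - 1) / 2).toNat else 0)
        = (a :: t).length / 2 := by
      split_ifs with h <;> omega
    have hfun : (fun k : Nat => (a :: t)[((1:Int) + 2 * (k : Int)).toNat]?) = fun k : Nat => (a :: t)[2 * k + 1]? := by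
      funext k
      have h : ((1:Int) + 2 * (k : Int)).toNat = 2 * k + 1 := by omega
      rw [h]
    rw [hcount, hfun]
    exact fm_odds _

lemma aStep_shift2 (t : List Int) (x y : Int) (st : Int × Int × Int × Int) (k : Nat) :
    aStep (x :: y :: t) st (2 + (k : Int)) = aStep t st (k : Int) := by
  obtain ⟨mw, mh, nw, nh⟩ := st
  have hmod : PySem.Int.mod (2 + (k : Int)) 2 = PySem.Int.mod (k : Int) 2 := by
    simp [PySem.Int.mod, Int.fmod_eq_emod]
  have hget : PySem.List.pyGetD (x :: y :: t) (2 + (k : Int)) 0 = PySem.List.pyGetD t (k : Int) 0 := by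
    rw [PySem.List.pyGetD_of_nonneg _ _ (by omega), PySem.List.pyGetD_natCast]
    have h : (2 + (k : Int)).toNat = k + 1 + 1 := by omega
    rw [h, List.getD_cons_succ, List.getD_cons_succ]
  simp only [aStep, hmod, hget]

lemma aStep_even (list : List Int) (i : Int) (v mw mh nw nh : Int)
    (hmod : PySem.Int.mod i 2 = 0) (hv : PySem.List.pyGetD list i 0 = v) :
    aStep list (mw, mh, nw, nh) i = (max mw v, mh, min nw v, nh) := by
  simp only [aStep, hmod, hv]
  norm_num
  constructor
  · rw [max_def]; split_ifs <;> omega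
  · rw [min_def]; split_ifs <;> omega

lemma aStep_odd (list : List Int) (i : Int) (v mw mh nw nh : Int)
    (hmod : PySem.Int.mod i 2 = 1) (hv : PySem.List.pyGetD list i 0 = v) :
    aStep list (mw, mh, nw, nh) i = (mw, max mh v, nw, min nh v) := by
  simp only [aStep, hmod, hv]
  norm_num
  constructor
  · rw [max_def]; split_ifs <;> omega
  · rw [min_def]; split_ifs <;> omega

lemma afold_eq (xs : List Int) : ∀ (mw mh nw nh : Int),
    (PySem.List.pyRange 0 (xs.length : Int) 1).foldl (aStep xs) (mw, mh, nw, nh)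
      = ((evens xs).foldl max mw, (odds xs).foldl max mh,
         (evens xs).foldl min nw, (odds xs).foldl min nh) := by
  induction xs using evens.induct with
  | case1 =>
    intro mw mh nw nh
    simp [PySem.List.pyRange_one_eq_nil, evens, odds]
  | case2 x =>
    intro mw mh nw nh
    have h1 : PySem.List.pyRange 0 (([x] : List Int).length : Int) 1 = [0] := by
      have := PySem.List.pyRange_one_singleton (0 : Int)
      simpa using this
    rw [h1]
    simp only [List.foldl_cons, List.foldl_nil]
    rw [aStep_even [x] 0 x mw mh nw nh (by decide) (by rw [PySem.List.pyGetD_ofNat']; rfl)]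
    simp [evens, odds]
  | case3 x y t ih =>
    intro mw mh nw nh
    have hn : ((x :: y :: t).length : Int) = (t.length : Int) + 2 := by
      simp only [List.length_cons]; push_cast; ring
    rw [hn]
    rw [PySem.List.pyRange_one_cons (by omega : (0:Int) < (t.length : Int) + 2),
        PySem.List.pyRange_one_cons (by omega : (0:Int) + 1 < (t.length : Int) + 2)]
    simp only [List.foldl_cons]
    rw [aStep_even (x :: y :: t) 0 x mw mh nw nh (by decide) (by rw [PySem.List.pyGetD_ofNat']; rfl)]
    rw [aStep_odd (x :: y :: t) (0 + 1) y (max mw x) mh (min nw x) nh (by decide)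
        (by rw [show ((0:Int) + 1) = ((1:Nat) : Int) by norm_num, PySem.List.pyGetD_natCast]; rfl)]
    have hr : PySem.List.pyRange (0 + 1 + 1) ((t.length : Int) + 2) 1
        = (List.range t.length).map (fun k : Nat => 2 + (k : Int)) := by
      rw [show ((0:Int) + 1 + 1) = 2 by norm_num, PySem.List.pyRange_one]
      have h : ((t.length : Int) + 2 - 2).toNat = t.length := by omega
      rw [h]
    rw [hr, List.foldl_map]
    have hcongr : List.foldl (fun st (k : Nat) => aStep (x :: y :: t) st (2 + (k : Int)))
          (max mw x, max mh y, min nw x, min nh y) (List.range t.length)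
        = List.foldl (fun st (k : Nat) => aStep t st (k : Int))
          (max mw x, max mh y, min nw x, min nh y) (List.range t.length) := by
      congr 1
      funext st k
      exact aStep_shift2 t x y st k
    rw [hcongr]
    have hback : List.foldl (fun st (k : Nat) => aStep t st (k : Int))
          (max mw x, max mh y, min nw x, min nh y) (List.range t.length)
        = (PySem.List.pyRange 0 (t.length : Int) 1).foldl (aStep t)
          (max mw x, max mh y, min nw x, min nh y) := by
      rw [PySem.List.pyRange_one, List.foldl_map]
      simp
    rw [hback, ih (max mw x) (max mh y) (min nw x) (min nh y)]
    simp [evens, odds]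

-- ===== VERDICT (by name: the statement is the Claim_ definition above) =====
theorem Max_point_spec : Claim_equal_Max_point := by
  intro list list1 _
  unfold Spec_Max_point Max_point Max_point_alt
  rw [slice2_evens, slice2_odds]
  simp only [Option.getD_some]
  rw [afold_eq list 0 0 1000 1000]
  rw [List.singleton_append, List.singleton_append, List.singleton_append, List.singleton_append,
      PySem.List.max?_id_cons, PySem.List.min?_id_cons, PySem.List.max?_id_cons, PySem.List.min?_id_cons]
  simp
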